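-- pv_equiv track=rewrite | github.com/galaxygoose/Hyperclass | reverse_image_search.py | _filter_and_prioritize_results
-- ===== SOURCE A (Python) =====
-- def _filter_and_prioritize_results(results):
--     """
--     Filter and prioritize search results, preferring AFP/Shutterstock sources
--     """
--     if not results:
--         return []
--
--     prioritized_results = []
--     other_results = []
--
--     for result in results:
--         url = result.get('url', '').lower()
--         title = result.get('title', '').lower()
--         source = result.get('source', '')
--
--         # Prioritize AFP and Shutterstock results
--         if source in ['AFP', 'Shutterstock', 'Getty Images']:
--             prioritized_results.append(result)
--         elif any(domain in url for domain in ['afp.com', 'shutterstock.com', 'gettyimages.com']):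
--             prioritized_results.append(result)
--         # Also consider other reliable sources
--         elif source in ['Reuters', 'AP News', 'BBC', 'CNN', 'Al Jazeera', 'News Source']:
--             prioritized_results.append(result)
--         elif any(domain in url for domain in ['reuters.com', 'apnews.com', 'bbc.com', 'cnn.com', 'aljazeera.com', 'dw.com', 'irishtimes.com', 'breakingnews.ie']):
--             prioritized_results.append(result)
--         # Military/government sources
--         elif any(term in title for term in ['military', 'defense', 'army', 'navy', 'air force', 'weapon', 'missile', 'naval', 'ship', 'warship']):
--             prioritized_results.append(result)
--         # For Google Vision results without URLs, include if they seem relevant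
--         elif source == 'Google Vision' and any(term in title for term in ['military', 'weapon', 'ship', 'aircraft', 'tank', 'naval']):
--             prioritized_results.append(result)
--         else:
--             other_results.append(result)
--
--     # Return prioritized results first, then others
--     return prioritized_results + other_results
-- ===== SOURCE B (Python) =====
-- TRUSTED_SOURCES = {'AFP', 'Shutterstock', 'Getty Images',
--                    'Reuters', 'AP News', 'BBC', 'CNN', 'Al Jazeera', 'News Source'}
-- TRUSTED_DOMAINS = ('afp.com', 'shutterstock.com', 'gettyimages.com',
--                    'reuters.com', 'apnews.com', 'bbc.com', 'cnn.com', 'aljazeera.com',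
--                    'dw.com', 'irishtimes.com', 'breakingnews.ie')
-- TITLE_TERMS = ('military', 'defense', 'army', 'navy', 'air force', 'weapon',
--                'missile', 'naval', 'ship', 'warship')
-- VISION_TERMS = ('military', 'weapon', 'ship', 'aircraft', 'tank', 'naval')
--
--
-- def _is_prioritized(result):
--     url = result.get('url', '').lower()
--     title = result.get('title', '').lower()
--     source = result.get('source', '')
--     return (source in TRUSTED_SOURCES
--             or any(domain in url for domain in TRUSTED_DOMAINS)
--             or any(term in title for term in TITLE_TERMS)
--             or (source == 'Google Vision'
--                 and any(term in title for term in VISION_TERMS)))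
--
--
-- def _filter_and_prioritize_results(results):
--     # Stable sort on a binary key: prioritized results first, each group in
--     # original order (no mutation of the input list).
--     return sorted(results, key=lambda r: 0 if _is_prioritized(r) else 1)
-- ===== Notes on version B (the rewrite author's own statement) =====
-- stated objective: idiomatic
-- what changed: Replaced A's explicit two-accumulator partition loop over a six-branch elif chain by one predicate _is_prioritized (the same disjunction, merged) and a single stable sort on a binary 0/1 key, which keeps prioritized results first and preserves original order within each group.
import Mathlib
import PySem

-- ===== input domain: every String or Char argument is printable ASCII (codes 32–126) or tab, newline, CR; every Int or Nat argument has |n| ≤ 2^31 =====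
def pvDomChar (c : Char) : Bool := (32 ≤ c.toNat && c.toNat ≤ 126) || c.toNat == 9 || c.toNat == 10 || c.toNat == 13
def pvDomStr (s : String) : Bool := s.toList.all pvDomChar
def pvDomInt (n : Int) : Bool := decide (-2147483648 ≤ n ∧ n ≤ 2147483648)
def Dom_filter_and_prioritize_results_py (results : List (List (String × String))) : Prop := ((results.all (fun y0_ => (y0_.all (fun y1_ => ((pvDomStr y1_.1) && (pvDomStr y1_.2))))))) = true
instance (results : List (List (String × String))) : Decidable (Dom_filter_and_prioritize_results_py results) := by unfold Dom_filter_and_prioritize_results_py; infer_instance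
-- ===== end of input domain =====

-- B replaces A's explicit two-accumulator partition loop by one stable sort on a
-- binary key (prioritized-or-not); same return value, simpler code, no mutation.

-- dict.get(k, dflt) on an association list: first match (shared primitive of both ports)
def pvGetD (d : List (String × String)) (k dflt : String) : String :=
  (d.lookup k).getD dflt

-- ===== PORT A =====
-- loop body of A's 'for result in results', acc = (prioritized_results, other_results)
def pvStepA (acc : List (List (String × String)) × List (List (String × String)))
    (result : List (String × String)) :
    List (List (String × String)) × List (List (String × String)) :=
  let url := PySem.Str.lower (pvGetD result "url" "")
  let title := PySem.Str.lower (pvGetD result "title" "")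
  let source := pvGetD result "source" ""
  if source ∈ (["AFP", "Shutterstock", "Getty Images"] : List String) then
    (acc.1 ++ [result], acc.2)
  else if (["afp.com", "shutterstock.com", "gettyimages.com"] : List String).any
      (fun domain => PySem.Str.isIn domain url) then
    (acc.1 ++ [result], acc.2)
  else if source ∈ (["Reuters", "AP News", "BBC", "CNN", "Al Jazeera", "News Source"] : List String) then
    (acc.1 ++ [result], acc.2)
  else if (["reuters.com", "apnews.com", "bbc.com", "cnn.com", "aljazeera.com", "dw.com",
      "irishtimes.com", "breakingnews.ie"] : List String).any
      (fun domain => PySem.Str.isIn domain url) then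
    (acc.1 ++ [result], acc.2)
  else if (["military", "defense", "army", "navy", "air force", "weapon", "missile",
      "naval", "ship", "warship"] : List String).any
      (fun term => PySem.Str.isIn term title) then
    (acc.1 ++ [result], acc.2)
  else if source = "Google Vision" ∧ (["military", "weapon", "ship", "aircraft", "tank",
      "naval"] : List String).any (fun term => PySem.Str.isIn term title) then
    (acc.1 ++ [result], acc.2)
  else
    (acc.1, acc.2 ++ [result])

def filter_and_prioritize_results_py (results : List (List (String × String))) :
    List (List (String × String)) :=
  if results = [] then []
  else
    let po := results.foldl pvStepA ([], [])
    po.1 ++ po.2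

-- ===== PORT B =====
def pvTrustedSources : List String :=
  ["AFP", "Shutterstock", "Getty Images", "Reuters", "AP News", "BBC", "CNN",
   "Al Jazeera", "News Source"]
def pvTrustedDomains : List String :=
  ["afp.com", "shutterstock.com", "gettyimages.com", "reuters.com", "apnews.com",
   "bbc.com", "cnn.com", "aljazeera.com", "dw.com", "irishtimes.com", "breakingnews.ie"]
def pvTitleTerms : List String :=
  ["military", "defense", "army", "navy", "air force", "weapon", "missile", "naval",
   "ship", "warship"]
def pvVisionTerms : List String :=
  ["military", "weapon", "ship", "aircraft", "tank", "naval"]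

def pvIsPrioritized (result : List (String × String)) : Bool :=
  let url := PySem.Str.lower (pvGetD result "url" "")
  let title := PySem.Str.lower (pvGetD result "title" "")
  let source := pvGetD result "source" ""
  decide (source ∈ pvTrustedSources) ||
  pvTrustedDomains.any (fun domain => PySem.Str.isIn domain url) ||
  pvTitleTerms.any (fun term => PySem.Str.isIn term title) ||
  (source == "Google Vision" && pvVisionTerms.any (fun term => PySem.Str.isIn term title))

def filter_and_prioritize_results_py_alt (results : List (List (String × String))) :
    List (List (String × String)) :=
  PySem.List.sorted results (fun r => if pvIsPrioritized r then (0 : Int) else 1) false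

-- ===== PRECONDITION & SPEC =====
def Spec_filter_and_prioritize_results_py (results : List (List (String × String))) (out : List (List (String × String))) : Prop := out = filter_and_prioritize_results_py_alt results
instance (results : List (List (String × String))) (out : List (List (String × String))) : Decidable (Spec_filter_and_prioritize_results_py results out) := by unfold Spec_filter_and_prioritize_results_py; infer_instance

-- ===== CLAIM (what is proved, stated in full; the proofs are below) =====
def Claim_equal_filter_and_prioritize_results_py : Prop := ∀ (results : List (List (String × String))), Dom_filter_and_prioritize_results_py results → Spec_filter_and_prioritize_results_py results (filter_and_prioritize_results_py results)

-- ===== LEMMAS AND PROOFS =====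

-- A's branch chain does exactly 'append right when prioritized, else left'.
lemma pvStepA_eq (acc : List (List (String × String)) × List (List (String × String)))
    (r : List (String × String)) :
    pvStepA acc r =
      if pvIsPrioritized r then (acc.1 ++ [r], acc.2) else (acc.1, acc.2 ++ [r]) := by
  simp only [pvStepA, pvIsPrioritized, pvTrustedSources, pvTrustedDomains, pvTitleTerms,
    pvVisionTerms]
  split_ifs with h1 h2 h3 h4 h5 h6 h7 <;>
    simp_all [List.any_cons, List.any_nil, List.mem_cons, beq_iff_eq, decide_eq_true_eq]

-- A's loop is the partition by pvIsPrioritized.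
lemma pvFoldA (xs : List (List (String × String)))
    (p o : List (List (String × String))) :
    xs.foldl pvStepA (p, o) =
      (p ++ xs.filter pvIsPrioritized, o ++ xs.filter (fun r => ! pvIsPrioritized r)) := by
  induction xs generalizing p o with
  | nil => simp
  | cons x xs ih =>
    rw [List.foldl_cons, pvStepA_eq]
    by_cases hx : pvIsPrioritized x <;> simp [hx, ih]

-- inserting between a false-prefix and a true-suffix
lemma pvInsertBy_middle {α : Type} (before : α → α → Bool) (x : α) (P Q : List α)
    (hP : ∀ y ∈ P, before x y = false) (hQ : ∀ y ∈ Q, before x y = true) :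
    PySem.List.insertBy before x (P ++ Q) = P ++ x :: Q := by
  induction P with
  | nil =>
    cases Q with
    | nil => simp [PySem.List.insertBy]
    | cons z Q' => simp [PySem.List.insertBy, hQ z (by simp)]
  | cons a P' ih =>
    simp only [List.cons_append, PySem.List.insertBy, hP a (by simp)]
    rw [ih (fun y hy => hP y (List.mem_cons_of_mem a hy))]
    simp

-- stable insertion sort on the binary key 0/1 builds the partition
lemma pvSortPartition (xs P Q : List (List (String × String)))
    (hP : ∀ y ∈ P, pvIsPrioritized y = true) (hQ : ∀ y ∈ Q, pvIsPrioritized y = false) :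
    xs.foldl (fun acc x =>
        PySem.List.insertBy
          (fun a b => decide ((if pvIsPrioritized a then (0 : Int) else 1) <
            (if pvIsPrioritized b then (0 : Int) else 1))) x acc) (P ++ Q) =
      (P ++ xs.filter pvIsPrioritized) ++ (Q ++ xs.filter (fun r => ! pvIsPrioritized r)) := by
  induction xs generalizing P Q with
  | nil => simp
  | cons x xs ih =>
    rw [List.foldl_cons]
    by_cases hx : pvIsPrioritized x
    · rw [pvInsertBy_middle _ x P Q
        (fun y hy => by simp [hx, hP y hy]) (fun y hy => by simp [hx, hQ y hy])]
      have hsplit : P ++ x :: Q = (P ++ [x]) ++ Q := by simp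
      rw [hsplit, ih (P ++ [x]) Q
        (by intro y hy
            rcases List.mem_append.1 hy with h | h
            · exact hP y h
            · simp_all) hQ]
      simp [hx]
    · rw [PySem.List.insertBy_of_forall_not_before _ x (P ++ Q)
        (by intro y _
            by_cases h : pvIsPrioritized y <;> simp [hx, h])]
      have hsplit : (P ++ Q) ++ [x] = P ++ (Q ++ [x]) := by simp
      rw [hsplit, ih P (Q ++ [x]) hP
        (by intro y hy
            rcases List.mem_append.1 hy with h | h
            · exact hQ y h
            · simp_all)]
      simp [hx]

lemma pvAltEq (results : List (List (String × String))) :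
    filter_and_prioritize_results_py_alt results =
      results.filter pvIsPrioritized ++ results.filter (fun r => ! pvIsPrioritized r) := by
  unfold filter_and_prioritize_results_py_alt
  rw [PySem.List.sorted_eq_foldl_insertBy]
  simpa using pvSortPartition results [] [] (by simp) (by simp)

-- ===== VERDICT (by name: the statement is the Claim_ definition above) =====
theorem filter_and_prioritize_results_py_spec : Claim_equal_filter_and_prioritize_results_py := by
  intro results _
  unfold Spec_filter_and_prioritize_results_py
  rw [pvAltEq]
  unfold filter_and_prioritize_results_py
  by_cases h : results = []
  · simp [h]
  · simp only [if_neg h, pvFoldA results [] []]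
    simp
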